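-- pv_equiv track=rewrite | github.com/paulwxq/VANNA-CHAINLIT-CHROMADB | data_pipeline/validators/file_count_validator.py | _get_expected_filename
-- ===== SOURCE A (Python) =====
-- def _get_expected_filename(table_spec: str) -> str:
--     """根据表名生成期望的文件名（复制FileNameManager的逻辑）"""
--     # 解析表名
--     if '.' in table_spec:
--         schema, table = table_spec.split('.', 1)
--     else:
--         schema, table = 'public', table_spec
--
--     # 生成基础文件名（遵循FileNameManager的规则）
--     if schema.lower() == 'public':
--         safe_name = table
--     else:
--         safe_name = f"{schema}__{table}"
--
--     # 替换特殊字符（遵循FileNameManager的规则）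
--     replacements = {
--         '.': '__',
--         '-': '_',
--         ' ': '_',
--         '/': '_',
--         '\\': '_',
--         ':': '_',
--         '*': '_',
--         '?': '_',
--         '"': '_',
--         '<': '_',
--         '>': '_',
--         '|': '_'
--     }
--
--     for old_char, new_char in replacements.items():
--         safe_name = safe_name.replace(old_char, new_char)
--
--     # 移除连续的下划线
--     while '__' in safe_name:
--         safe_name = safe_name.replace('__', '_')
--
--     return safe_name
-- ===== SOURCE B (Python) =====
-- def _get_expected_filename(table_spec: str) -> str:
--     """Same parsing as A; then a single left-to-right scan replaces the
--     twelve-replacement pipeline and the '__'-collapse loop."""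
--     if '.' in table_spec:
--         schema, table = table_spec.split('.', 1)
--     else:
--         schema, table = 'public', table_spec
--
--     base = table if schema.lower() == 'public' else f"{schema}__{table}"
--
--     specials = set('.- /\\:*?"<>|_')
--     out = []
--     for ch in base:
--         if ch in specials:
--             if not out or out[-1] != '_':
--                 out.append('_')
--         else:
--             out.append(ch)
--     return ''.join(out)
-- ===== Notes on version B (the rewrite author's own statement) =====
-- stated objective: simpler
-- what changed: The twelve sequential str.replace passes plus the loop that repeatedly collapses double underscores are replaced by one left-to-right scan over the base name that emits an underscore for a special/underscore character only when the previously emitted character is not already an underscore.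
import Mathlib
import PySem

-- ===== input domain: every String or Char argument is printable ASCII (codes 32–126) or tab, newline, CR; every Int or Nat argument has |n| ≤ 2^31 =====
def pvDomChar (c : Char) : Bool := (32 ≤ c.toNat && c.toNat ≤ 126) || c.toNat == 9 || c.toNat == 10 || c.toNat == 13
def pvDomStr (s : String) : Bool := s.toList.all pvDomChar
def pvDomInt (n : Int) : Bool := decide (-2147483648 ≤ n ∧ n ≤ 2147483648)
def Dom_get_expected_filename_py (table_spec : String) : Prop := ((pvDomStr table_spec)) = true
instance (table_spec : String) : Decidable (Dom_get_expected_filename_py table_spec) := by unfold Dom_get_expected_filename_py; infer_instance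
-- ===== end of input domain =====

-- B replaces A's twelve sequential replace passes and the '__'-collapse while-loop by one left-to-right scan over the base name; objective: simpler.


-- ===== PORT A =====
-- one pass of safe_name.replace('__','_'), and the facts the port's termination proof cites
def pvStep : List Char → List Char
  | [] => []
  | [c] => [c]
  | c :: d :: t => if c = '_' ∧ d = '_' then '_' :: pvStep t else c :: pvStep (d :: t)

theorem pvGoDouble (fuel : Nat) (l acc : List Char) (h : l.length ≤ fuel) :
    PySem.Chars.replace.go ['_', '_'] ['_'] fuel l acc = acc.reverse ++ pvStep l := by
  induction fuel generalizing l acc with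
  | zero =>
    have : l = [] := by cases l <;> simp_all
    subst this
    simp [PySem.Chars.replace.go, pvStep]
  | succ n ih =>
    match l with
    | [] => simp [PySem.Chars.replace.go, pvStep]
    | [c] =>
      simp only [PySem.Chars.replace.go, List.isPrefixOf, Bool.and_false]
      simp [ih [] (c :: acc) (by simp), pvStep]
    | c :: d :: t =>
      have ht : t.length ≤ n := by have := h; simp at this; omega
      have ht' : (d :: t).length ≤ n := by have := h; simp at this ⊢; omega
      simp only [PySem.Chars.replace.go, List.isPrefixOf]
      by_cases hcd : c = '_' ∧ d = '_'
      · obtain ⟨rfl, rfl⟩ := hcd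
        rw [if_pos (by simp)]
        simp only [List.length_cons, List.drop_succ_cons, List.drop_zero, List.length_nil,
          List.reverse_cons, List.reverse_nil, List.nil_append]
        rw [ih t (['_'] ++ acc) ht]
        simp [pvStep]
      · rw [if_neg (by
          simp only [Bool.and_true, Bool.and_eq_true, beq_iff_eq]
          rintro ⟨h1, h2⟩
          exact hcd ⟨h1.symm, h2.symm⟩)]
        rw [ih (d :: t) (c :: acc) ht']
        simp [pvStep, if_neg hcd]

theorem pvReplaceDouble (s : List Char) :
    PySem.Chars.replace s ['_', '_'] ['_'] = pvStep s := by
  rw [PySem.Chars.replace]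
  simp [pvGoDouble s.length s [] le_rfl]

theorem pvStep_length_le (l : List Char) : (pvStep l).length ≤ l.length := by
  fun_induction pvStep l <;> simp_all <;> omega

theorem pvStep_length_lt (l : List Char) (h : ['_', '_'] <:+: l) :
    (pvStep l).length < l.length := by
  fun_induction pvStep l with
  | case1 => simp at h
  | case2 c => have := h.length_le; simp at this
  | case3 c d t hcd ih =>
    simp only [pvStep, if_pos hcd, List.length_cons]
    have := pvStep_length_le t
    omega
  | case4 c d t hcd ih =>
    have h' : ['_', '_'] <:+: d :: t := by
      obtain ⟨s1, s2, hs⟩ := h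
      match s1, hs with
      | [], hs =>
        simp only [List.nil_append, List.cons_append] at hs
        exact absurd ⟨(List.cons.injEq .. ▸ hs).1.symm, ((List.cons.injEq .. ▸ (List.cons.injEq .. ▸ hs).2).1).symm⟩ hcd
      | e :: s1', hs =>
        have : s1' ++ ['_', '_'] ++ s2 = d :: t := by injection hs
        exact ⟨s1', s2, this⟩
    simp only [pvStep, if_neg hcd, List.length_cons]
    have := ih h'
    simp at this
    omega

theorem pvCollapseLen (s : List Char) (h : PySem.Chars.isIn ['_', '_'] s = true) :
    (PySem.Chars.replace s ['_', '_'] ['_']).length < s.length := by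
  rw [pvReplaceDouble]
  exact pvStep_length_lt s ((PySem.Chars.isIn_iff_infix _ _).mp h)

-- the 'while "__" in safe_name: safe_name = safe_name.replace("__","_")' loop
def pvCollapseA (s : List Char) : List Char :=
  if h : PySem.Chars.isIn ['_', '_'] s then
    pvCollapseA (PySem.Chars.replace s ['_', '_'] ['_'])
  else s
termination_by s.length
decreasing_by exact pvCollapseLen s h

-- the replacements dict, in insertion order
def pvReplacements : List (List Char × List Char) :=
  [(['.'], ['_', '_']), (['-'], ['_']), ([' '], ['_']), (['/'], ['_']), (['\\'], ['_']),
   ([':'], ['_']), (['*'], ['_']), (['?'], ['_']), (['"'], ['_']), (['<'], ['_']),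
   (['>'], ['_']), (['|'], ['_'])]

def get_expected_filename_py (table_spec : String) : String :=
  let st : String × String :=
    if PySem.Str.isIn "." table_spec then
      -- schema, table = table_spec.split('.', 1): with '.' present the split has two parts;
      -- the getD defaults are unreachable guards
      (((PySem.Str.splitMax? table_spec "." 1).getD []).getD 0 "public",
       ((PySem.Str.splitMax? table_spec "." 1).getD []).getD 1 table_spec)
    else ("public", table_spec)
  String.ofList (pvCollapseA (pvReplacements.foldl (fun s p => PySem.Chars.replace s p.1 p.2)
    (if PySem.Chars.lower st.1.toList == "public".toList
     then st.2.toList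
     else st.1.toList ++ ('_' :: '_' :: st.2.toList))))

-- ===== PORT B =====
def pvSpecials : PySem.Set Char :=
  PySem.Set.ofList ['.', '-', ' ', '/', '\\', ':', '*', '?', '"', '<', '>', '|', '_']

def get_expected_filename_py_alt (table_spec : String) : String :=
  let st : String × String :=
    if PySem.Str.isIn "." table_spec then
      -- schema, table = table_spec.split('.', 1): with '.' present the split has two parts;
      -- the getD defaults are unreachable guards
      (((PySem.Str.splitMax? table_spec "." 1).getD []).getD 0 "public",
       ((PySem.Str.splitMax? table_spec "." 1).getD []).getD 1 table_spec)
    else ("public", table_spec)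
  String.ofList
    ((if PySem.Chars.lower st.1.toList == "public".toList
      then st.2.toList
      else st.1.toList ++ ('_' :: '_' :: st.2.toList)).foldl
      (fun acc ch =>
        if pvSpecials.contains ch then
          if acc.isEmpty || !(acc.getLast? == some '_') then acc ++ ['_'] else acc
        else acc ++ [ch]) [])

-- ===== PRECONDITION & SPEC =====
def Spec_get_expected_filename_py (table_spec : String) (out : String) : Prop := out = get_expected_filename_py_alt table_spec
instance (table_spec : String) (out : String) : Decidable (Spec_get_expected_filename_py table_spec out) := by unfold Spec_get_expected_filename_py; infer_instance

-- ===== CLAIM (what is proved, stated in full; the proofs are below) =====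
def Claim_equal_get_expected_filename_py : Prop := ∀ (table_spec : String), Dom_get_expected_filename_py table_spec → Spec_get_expected_filename_py table_spec (get_expected_filename_py table_spec)

-- ===== LEMMAS AND PROOFS =====

-- the net effect of the whole replacement pipeline, per character
def pvF (c : Char) : List Char :=
  if c = '.' then ['_', '_']
  else if c ∈ ['-', ' ', '/', '\\', ':', '*', '?', '"', '<', '>', '|'] then ['_']
  else [c]

-- run-collapse of underscores, with a 'previous emitted char was _' flag
def pvSq : Bool → List Char → List Char
  | _, [] => []
  | prev, c :: t =>
    if c = '_' then (if prev then pvSq true t else '_' :: pvSq true t)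
    else c :: pvSq false t

-- B's scan, as structural recursion with the same flag
def pvScan : Bool → List Char → List Char
  | _, [] => []
  | prev, c :: t =>
    if pvSpecials.contains c then (if prev then pvScan true t else '_' :: pvScan true t)
    else c :: pvScan false t

theorem pvGoSingle (a : Char) (bs : List Char) (fuel : Nat) (l acc : List Char)
    (h : l.length ≤ fuel) :
    PySem.Chars.replace.go [a] bs fuel l acc
      = acc.reverse ++ l.flatMap (fun x => if x = a then bs else [x]) := by
  induction fuel generalizing l acc with
  | zero =>
    have : l = [] := by cases l <;> simp_all
    subst this
    simp [PySem.Chars.replace.go]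
  | succ n ih =>
    match l with
    | [] => simp [PySem.Chars.replace.go]
    | c :: t =>
      have ht : t.length ≤ n := by have := h; simp at this; omega
      simp only [PySem.Chars.replace.go, List.isPrefixOf, Bool.and_true]
      by_cases hc : c = a
      · subst hc
        rw [if_pos (by simp)]
        simp only [List.length_cons, List.length_nil, List.drop_succ_cons, List.drop_zero]
        rw [ih t (bs.reverse ++ acc) ht]
        simp
      · rw [if_neg (by simp only [beq_iff_eq]; intro h1; exact hc h1.symm)]
        rw [ih t (c :: acc) ht]
        simp [hc]

theorem pvReplSingle (a : Char) (bs : List Char) (s : List Char) :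
    PySem.Chars.replace s [a] bs = s.flatMap (fun x => if x = a then bs else [x]) := by
  rw [PySem.Chars.replace]
  simp [pvGoSingle a bs s.length s [] le_rfl]

theorem pvPipeline (base : List Char) :
    pvReplacements.foldl (fun s p => PySem.Chars.replace s p.1 p.2) base = base.flatMap pvF := by
  simp only [pvReplacements, List.foldl_cons, List.foldl_nil]
  simp only [pvReplSingle]
  simp only [List.flatMap_assoc]
  congr 1
  funext c
  by_cases h1 : c = '.'
  · subst h1; rfl
  by_cases h2 : c = '-'
  · subst h2; rfl
  by_cases h3 : c = ' '
  · subst h3; rfl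
  by_cases h4 : c = '/'
  · subst h4; rfl
  by_cases h5 : c = '\\'
  · subst h5; rfl
  by_cases h6 : c = ':'
  · subst h6; rfl
  by_cases h7 : c = '*'
  · subst h7; rfl
  by_cases h8 : c = '?'
  · subst h8; rfl
  by_cases h9 : c = '"'
  · subst h9; rfl
  by_cases h10 : c = '<'
  · subst h10; rfl
  by_cases h11 : c = '>'
  · subst h11; rfl
  by_cases h12 : c = '|'
  · subst h12; rfl
  simp [pvF, h1, h2, h3, h4, h5, h6, h7, h8, h9, h10, h11, h12]

theorem pvSq_step (l : List Char) (prev : Bool) : pvSq prev (pvStep l) = pvSq prev l := by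
  fun_induction pvStep l generalizing prev with
  | case1 => rfl
  | case2 c => rfl
  | case3 c d t hcd ih =>
    obtain ⟨rfl, rfl⟩ := hcd
    cases prev <;> simp [pvSq, ih]
  | case4 c d t hcd ih =>
    by_cases hc : c = '_'
    · subst hc
      cases prev <;> simp [pvSq, ih]
    · cases prev <;> simp [pvSq, hc, ih]

theorem pvSq_fix (l : List Char) (h : ¬ (['_', '_'] <:+: l)) (p : Bool)
    (hp : p = true → l.head? ≠ some '_') : pvSq p l = l := by
  induction l generalizing p with
  | nil => rfl
  | cons c t ih =>
    have htinf : ¬ (['_', '_'] <:+: t) := fun hi => h (List.infix_cons hi)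
    by_cases hc : c = '_'
    · subst hc
      have hpf : p = false := by
        cases p
        · rfl
        · exact absurd rfl (fun q => (hp q) (by simp))
      subst hpf
      have hth : t.head? ≠ some '_' := by
        intro hh
        cases t with
        | nil => simp at hh
        | cons e t' =>
          simp at hh
          subst hh
          exact h ⟨[], t', rfl⟩
      simp [pvSq, ih htinf true (fun _ => hth)]
    · simp [pvSq, hc, ih htinf false (by simp)]

theorem pvCollapse_eq (l : List Char) : pvCollapseA l = pvSq false l := by
  fun_induction pvCollapseA l with
  | case1 l h ih =>
    rw [ih, pvReplaceDouble, pvSq_step]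
  | case2 l h =>
    have : ¬ (['_', '_'] <:+: l) :=
      (PySem.Chars.isIn_eq_false_iff _ _).mp (Bool.not_eq_true _ ▸ eq_false_of_ne_true h)
    exact (pvSq_fix l this false (by simp)).symm


theorem pvSq_flat (l : List Char) (prev : Bool) :
    pvSq prev (l.flatMap pvF) = pvScan prev l := by
  induction l generalizing prev with
  | nil => rfl
  | cons c t ih =>
    simp only [List.flatMap_cons]
    by_cases h1 : c = '.'
    · subst h1; cases prev <;> simp [pvF, pvSq, pvScan, ih, show ('.' ∈ pvSpecials) from by decide]
    by_cases h2 : c = '-'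
    · subst h2; cases prev <;> simp [pvF, pvSq, pvScan, ih, show ('-' ∈ pvSpecials) from by decide]
    by_cases h3 : c = ' '
    · subst h3; cases prev <;> simp [pvF, pvSq, pvScan, ih, show (' ' ∈ pvSpecials) from by decide]
    by_cases h4 : c = '/'
    · subst h4; cases prev <;> simp [pvF, pvSq, pvScan, ih, show ('/' ∈ pvSpecials) from by decide]
    by_cases h5 : c = '\\'
    · subst h5; cases prev <;> simp [pvF, pvSq, pvScan, ih, show ('\\' ∈ pvSpecials) from by decide]
    by_cases h6 : c = ':'
    · subst h6; cases prev <;> simp [pvF, pvSq, pvScan, ih, show (':' ∈ pvSpecials) from by decide]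
    by_cases h7 : c = '*'
    · subst h7; cases prev <;> simp [pvF, pvSq, pvScan, ih, show ('*' ∈ pvSpecials) from by decide]
    by_cases h8 : c = '?'
    · subst h8; cases prev <;> simp [pvF, pvSq, pvScan, ih, show ('?' ∈ pvSpecials) from by decide]
    by_cases h9 : c = '"'
    · subst h9; cases prev <;> simp [pvF, pvSq, pvScan, ih, show ('"' ∈ pvSpecials) from by decide]
    by_cases h10 : c = '<'
    · subst h10; cases prev <;> simp [pvF, pvSq, pvScan, ih, show ('<' ∈ pvSpecials) from by decide]
    by_cases h11 : c = '>'
    · subst h11; cases prev <;> simp [pvF, pvSq, pvScan, ih, show ('>' ∈ pvSpecials) from by decide]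
    by_cases h12 : c = '|'
    · subst h12; cases prev <;> simp [pvF, pvSq, pvScan, ih, show ('|' ∈ pvSpecials) from by decide]
    by_cases h13 : c = '_'
    · subst h13; cases prev <;> simp [pvF, pvSq, pvScan, ih, show ('_' ∈ pvSpecials) from by decide]
    · have hcon : c ∉ pvSpecials := by
        intro hm
        rw [pvSpecials] at hm
        have := (PySem.Set.mem_ofList _ _).mp hm
        simp only [List.mem_cons, List.not_mem_nil, or_false] at this
        rcases this with h|h|h|h|h|h|h|h|h|h|h|h|h <;> simp_all
      have hf : pvF c = [c] := by simp [pvF, h1, h2, h3, h4, h5, h6, h7, h8, h9, h10, h11, h12]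
      rw [hf]
      simp [pvSq, pvScan, h13, hcon, ih]

theorem pvFoldB (l : List Char) (acc : List Char) :
    l.foldl (fun acc ch =>
        if pvSpecials.contains ch then
          if acc.isEmpty || !(acc.getLast? == some '_') then acc ++ ['_'] else acc
        else acc ++ [ch]) acc
      = acc ++ pvScan (acc.getLast? == some '_') l := by
  induction l generalizing acc with
  | nil => simp [pvScan]
  | cons c t ih =>
    simp only [List.foldl_cons]
    by_cases hcon : pvSpecials.contains c = true
    · rw [if_pos hcon]
      by_cases hprev : (acc.getLast? == some '_') = true
      · have hne : acc.isEmpty = false := by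
          cases acc
          · simp at hprev
          · simp
        rw [if_neg (by simp [hne, hprev])]
        rw [ih acc, hprev]
        simp [pvScan, (PySem.Set.contains_iff _ _).mp hcon]
      · rw [if_pos (by simp [Bool.not_eq_true] at hprev; simp [hprev])]
        rw [ih (acc ++ ['_'])]
        rw [List.getLast?_concat]
        simp only [Bool.not_eq_true] at hprev
        simp [pvScan, (PySem.Set.contains_iff _ _).mp hcon, hprev]
    · rw [if_neg hcon]
      rw [ih (acc ++ [c])]
      rw [List.getLast?_concat]
      have hcu : c ≠ '_' := by
        intro h
        subst h
        exact hcon (by decide)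
      have : (some c == some '_') = false := by simp [hcu]
      rw [this]
      have hmem : c ∉ pvSpecials := fun hm => hcon ((PySem.Set.contains_iff _ _).mpr hm)
      simp [pvScan, hmem]

theorem pvMain (base : List Char) :
    pvCollapseA (pvReplacements.foldl (fun s p => PySem.Chars.replace s p.1 p.2) base)
      = base.foldl (fun acc ch =>
          if pvSpecials.contains ch then
            if acc.isEmpty || !(acc.getLast? == some '_') then acc ++ ['_'] else acc
          else acc ++ [ch]) [] := by
  rw [pvPipeline, pvCollapse_eq, pvSq_flat, pvFoldB]
  rfl

-- ===== VERDICT (by name: the statement is the Claim_ definition above) =====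
theorem get_expected_filename_py_spec : Claim_equal_get_expected_filename_py := by
  intro table_spec _
  simp only [Spec_get_expected_filename_py, get_expected_filename_py, get_expected_filename_py_alt]
  exact congrArg String.ofList (pvMain _)
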